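-- pv_equiv track=rewrite | github.com/linkv12/bib2md | reff_parser.py | author_formatter
-- ===== SOURCE A (Python) =====
-- def _name_abrv(name:str) :
--     special_word = ['de']
--     abbrv_name = name.split(' ')
--     word_amount = len(abbrv_name)
--     res = ''
--     for i in range(word_amount):
--         if i < word_amount-1 :
--             if abbrv_name[i] in special_word :
--                 res = '%s %s' % (res, abbrv_name[i])
--             else :
--                 ab_word = abbrv_name[i][:1] + "."
--                 res = '%s %s' % (res, ab_word)
--         else :
--             res = '%s %s' % (res, abbrv_name[i])
--     return res[1::]
--
-- def author_formatter(author:str) :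
--     # parsing based on ieee standard
--     #
--     res = author.split(" and ")
--     author_amnt = len(res)
--     # replace other in author list
--     replacement_for = 'et al.'
--
--     temp = None
--     if author_amnt == 1 :
--         # one author
--         temp = _name_abrv(res[0])
--     elif author_amnt == 2 :
--         # two author
--         temp = _name_abrv(res[0])
--         if res[1].find('others')>= 0 :
--             temp = "%s %s" % (temp, replacement_for)
--         else :
--             temp = "%s and %s" % (temp, _name_abrv(res[1]))
--     elif author_amnt >= 3 or author_amnt <= 6 :
--         # 3-6 author
--         temp = _name_abrv(res[0])
--         for i in range(1, author_amnt) :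
--             if i == author_amnt -1 :
--                 if res[i].find('others')>= 0 :
--                     temp = "%s %s" % (temp, replacement_for)
--                 else :
--                     temp = "%s and %s" % (temp, _name_abrv(res[i]))
--             else :
--                 if res[i].find('others')>= 0 :
--                     temp = "%s %s" % (temp, replacement_for)
--                 else :
--                     temp = "%s, %s" % (temp, _name_abrv(res[i]))
--     else :
--         # more than 6 author
--         temp = _name_abrv(res[0])
--         temp = "%s %s" % (temp, replacement_for)
--
--     return temp
-- ===== SOURCE B (Python) =====
-- def _abrv_go(words):
--     # recursive: last word kept whole, 'de' kept, other words abbreviated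
--     if len(words) == 1:
--         return words[0]
--     w = words[0]
--     return (w if w == 'de' else w[:1] + '.') + ' ' + _abrv_go(words[1:])
--
-- def _name_abrv(name: str):
--     return _abrv_go(name.split(' '))
--
-- def _go_authors(authors):
--     # recursive over the tail authors: emit ' et al.' for an 'others' entry,
--     # ' and ' before the structurally last author, ', ' otherwise
--     if not authors:
--         return ''
--     a, rest = authors[0], authors[1:]
--     if 'others' in a:
--         return ' et al.' + _go_authors(rest)
--     if not rest:
--         return ' and ' + _name_abrv(a)
--     return ', ' + _name_abrv(a) + _go_authors(rest)
--
-- def author_formatter(author: str):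
--     res = author.split(' and ')
--     return _name_abrv(res[0]) + _go_authors(res[1:])
-- ===== Notes on version B (the rewrite author's own statement) =====
-- stated objective: alternative
-- what changed: Replaced A's author-count branch ladder plus index-based accumulator loops with pure structural recursion: a recursive word abbreviator and a recursive formatter over the tail author list that decides last-author joining by whether the remaining list is empty, with no indices or counts at all.
import Mathlib
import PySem

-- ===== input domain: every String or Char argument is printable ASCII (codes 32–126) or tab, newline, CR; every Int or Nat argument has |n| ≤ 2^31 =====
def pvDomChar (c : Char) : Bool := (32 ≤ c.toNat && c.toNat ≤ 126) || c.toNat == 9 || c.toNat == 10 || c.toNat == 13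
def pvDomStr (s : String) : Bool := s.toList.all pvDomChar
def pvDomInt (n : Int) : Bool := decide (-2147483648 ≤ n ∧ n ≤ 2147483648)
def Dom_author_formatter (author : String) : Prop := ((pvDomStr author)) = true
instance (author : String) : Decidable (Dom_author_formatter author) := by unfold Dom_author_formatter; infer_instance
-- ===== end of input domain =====

-- B replaces A's author-count branch ladder (whose >6 branch is unreachable) and its index-based
-- accumulator loops by pure structural recursion over the split lists (objective: alternative).

-- shared primitive wrapper: Python's s.split(sep) for a non-empty sep
def pvSplit (s sep : String) : List String :=
  (PySem.Str.split? s sep).getD []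

-- ===== PORT A =====
def name_abrv (name : String) : String :=
  let specialWord : List String := ["de"]
  let abbrvName := pvSplit name " "
  let wordAmount := abbrvName.length
  let res := (PySem.List.pyRange 0 (wordAmount : Int) 1).foldl
    (fun res i =>
      if i < (wordAmount : Int) - 1 then
        if PySem.List.pyGetD abbrvName i "" ∈ specialWord then
          res ++ " " ++ PySem.List.pyGetD abbrvName i ""
        else
          res ++ " " ++ (PySem.Str.slice (PySem.List.pyGetD abbrvName i "") none (some 1) ++ ".")
      else
        res ++ " " ++ PySem.List.pyGetD abbrvName i "") ""
  PySem.Str.slice res (some 1) none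

def author_formatter (author : String) : String :=
  let res := pvSplit author " and "
  let authorAmnt := res.length
  let replacementFor := "et al."
  if authorAmnt = 1 then
    name_abrv (PySem.List.pyGetD res 0 "")
  else if authorAmnt = 2 then
    let temp := name_abrv (PySem.List.pyGetD res 0 "")
    if 0 ≤ PySem.Str.find (PySem.List.pyGetD res 1 "") "others" then
      temp ++ " " ++ replacementFor
    else
      temp ++ " and " ++ name_abrv (PySem.List.pyGetD res 1 "")
  else if 3 ≤ authorAmnt ∨ authorAmnt ≤ 6 then
    let temp0 := name_abrv (PySem.List.pyGetD res 0 "")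
    (PySem.List.pyRange 1 (authorAmnt : Int) 1).foldl
      (fun temp i =>
        if i = (authorAmnt : Int) - 1 then
          if 0 ≤ PySem.Str.find (PySem.List.pyGetD res i "") "others" then
            temp ++ " " ++ replacementFor
          else
            temp ++ " and " ++ name_abrv (PySem.List.pyGetD res i "")
        else
          if 0 ≤ PySem.Str.find (PySem.List.pyGetD res i "") "others" then
            temp ++ " " ++ replacementFor
          else
            temp ++ ", " ++ name_abrv (PySem.List.pyGetD res i "")) temp0
  else
    name_abrv (PySem.List.pyGetD res 0 "") ++ " " ++ replacementFor

-- ===== PORT B =====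
-- recursive word abbreviator: last word kept whole, 'de' kept, others abbreviated
-- ([] is unreachable: Python's split never yields an empty list, so the Python helper never sees it)
def abrvGo : List String → String
  | [] => ""
  | [w] => w
  | w :: rest => (if w = "de" then w else PySem.Str.slice w none (some 1) ++ ".") ++ " " ++ abrvGo rest

def name_abrv_alt (name : String) : String :=
  abrvGo (pvSplit name " ")

-- recursive formatter over the tail authors: ' et al.' for an 'others' entry,
-- ' and ' before the structurally last author, ', ' otherwise
def goAuthors : List String → String
  | [] => ""
  | a :: rest =>
    if PySem.Str.isIn "others" a then " et al." ++ goAuthors rest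
    else if rest = [] then " and " ++ name_abrv_alt a
    else ", " ++ name_abrv_alt a ++ goAuthors rest

def author_formatter_alt (author : String) : String :=
  let res := pvSplit author " and "
  name_abrv_alt (PySem.List.pyGetD res 0 "") ++ goAuthors (res.drop 1)

-- ===== PRECONDITION & SPEC =====
def Spec_author_formatter (author : String) (out : String) : Prop := out = author_formatter_alt author
instance (author : String) (out : String) : Decidable (Spec_author_formatter author out) := by unfold Spec_author_formatter; infer_instance

-- ===== CLAIM (what is proved, stated in full; the proofs are below) =====
def Claim_equal_author_formatter : Prop := ∀ (author : String), Dom_author_formatter author → Spec_author_formatter author (author_formatter author)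

-- ===== LEMMAS AND PROOFS =====

-- s.split(sep) is never the empty list (for non-empty sep)
lemma splitOn_go_ne_nil (sep : List Char) :
    ∀ (fuel : Nat) (l cur : List Char) (acc : List (List Char)),
      PySem.Chars.splitOn.go sep fuel l cur acc ≠ [] := by
  intro fuel
  induction fuel with
  | zero => intro l cur acc; simp [PySem.Chars.splitOn.go]
  | succ n ih =>
    intro l cur acc
    cases l with
    | nil => simp [PySem.Chars.splitOn.go]
    | cons c rest =>
      rw [PySem.Chars.splitOn.go]
      split
      · exact ih _ _ _
      · exact ih _ _ _

lemma pvSplit_ne_nil (s sep : String) (h : sep ≠ "") : pvSplit s sep ≠ [] := by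
  have hsep : sep.toList ≠ [] := fun hc => h (by
    have := congrArg String.ofList hc
    simpa using this)
  have hbridge := PySem.Str.split?_map s sep
  rw [PySem.Chars.split?] at hbridge
  simp only [List.isEmpty_iff, hsep, if_false] at hbridge
  unfold pvSplit
  cases hq : PySem.Str.split? s sep with
  | none => rw [hq] at hbridge; simp at hbridge
  | some l =>
    rw [hq] at hbridge
    simp only [Option.map_some, Option.some.injEq] at hbridge
    intro hnil
    simp only [Option.getD_some] at hnil
    subst hnil
    simp only [List.map_nil] at hbridge
    exact splitOn_go_ne_nil _ _ _ _ _ hbridge.symm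

-- proof helper: the suffix A's name_abrv fold produces (each piece preceded by a space)
def sfxAbrv : List String → String
  | [] => ""
  | [w] => " " ++ w
  | w :: rest => " " ++ (if w = "de" then w else PySem.Str.slice w none (some 1) ++ ".") ++ sfxAbrv rest

-- A's index fold over a suffix of the word list computes acc ++ sfxAbrv of that suffix
lemma abrv_fold_eq_sfx (ws : List String) :
    ∀ (k j : Nat) (acc : String), ws.length - j = k →
      (PySem.List.pyRange (j : Int) (ws.length : Int) 1).foldl
        (fun res i =>
          if i < (ws.length : Int) - 1 then
            if PySem.List.pyGetD ws i "" ∈ ["de"] then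
              res ++ " " ++ PySem.List.pyGetD ws i ""
            else
              res ++ " " ++ (PySem.Str.slice (PySem.List.pyGetD ws i "") none (some 1) ++ ".")
          else
            res ++ " " ++ PySem.List.pyGetD ws i "") acc
      = acc ++ sfxAbrv (ws.drop j) := by
  intro k
  induction k with
  | zero =>
    intro j acc hk
    have hle : ws.length ≤ j := by omega
    rw [PySem.List.pyRange_one_eq_nil (by exact_mod_cast hle),
      List.drop_eq_nil_of_le hle]
    simp [sfxAbrv]
  | succ k ih =>
    intro j acc hk
    have hlt : j < ws.length := by omega
    rw [PySem.List.pyRange_one_cons (by exact_mod_cast hlt)]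
    rw [List.foldl_cons]
    have hcast : ((j : Int) + 1) = ((j + 1 : Nat) : Int) := by push_cast; ring
    rw [hcast, ih (j+1) _ (by omega)]
    rw [List.drop_eq_getElem_cons hlt]
    have hget : PySem.List.pyGetD ws (j : Int) "" = ws[j] := by
      simp [PySem.List.pyGetD_natCast, List.getD_eq_getElem?_getD, List.getElem?_eq_getElem hlt]
    by_cases hlast : j + 1 < ws.length
    · have hc : (j : Int) < (ws.length : Int) - 1 := by omega
      rw [if_pos hc]
      obtain ⟨a, t, ht⟩ := List.exists_cons_of_ne_nil
        (by simp [List.drop_eq_nil_iff]; omega : ws.drop (j+1) ≠ [])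
      rw [ht]
      show _ = acc ++ sfxAbrv (ws[j] :: a :: t)
      by_cases hde : PySem.List.pyGetD ws (j : Int) "" ∈ ["de"]
      · rw [if_pos hde]
        simp only [List.mem_singleton] at hde
        rw [hget] at hde ⊢
        simp [sfxAbrv, hde, String.append_assoc]
      · rw [if_neg hde]
        simp only [List.mem_singleton] at hde
        rw [hget] at hde ⊢
        simp [sfxAbrv, hde, String.append_assoc]
    · have hj : j = ws.length - 1 := by omega
      have hc : ¬ (j : Int) < (ws.length : Int) - 1 := by omega
      rw [if_neg hc]
      have hdrop : ws.drop (j+1) = [] := List.drop_eq_nil_of_le (by omega)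
      rw [hdrop, hget]
      simp [sfxAbrv, String.append_assoc]

-- sfxAbrv is a space followed by B's recursive abbreviator
lemma sfxAbrv_eq (ws : List String) (h : ws ≠ []) : sfxAbrv ws = " " ++ abrvGo ws := by
  induction ws with
  | nil => exact absurd rfl h
  | cons w rest ih =>
    cases rest with
    | nil => simp [sfxAbrv, abrvGo]
    | cons a t =>
      rw [show sfxAbrv (w :: a :: t)
          = " " ++ (if w = "de" then w else PySem.Str.slice w none (some 1) ++ ".") ++ sfxAbrv (a :: t) from rfl,
        ih (by simp),
        show abrvGo (w :: a :: t)
          = (if w = "de" then w else PySem.Str.slice w none (some 1) ++ ".") ++ " " ++ abrvGo (a :: t) from rfl]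
      simp [String.append_assoc]

-- dropping the leading space
lemma slice_one_space (s : String) : PySem.Str.slice (" " ++ s) (some 1) none = s := by
  apply String.toList_inj.mp
  rw [PySem.Str.toList_slice, PySem.Chars.slice_eq_listSlice,
    PySem.List.slice_from _ (by norm_num : (0:Int) ≤ 1)]
  simp

-- unfolding lemma for goAuthors on a cons
lemma goAuthors_cons (a : String) (rest : List String) :
    goAuthors (a :: rest)
      = if PySem.Str.isIn "others" a then " et al." ++ goAuthors rest
        else if rest = [] then " and " ++ name_abrv_alt a
        else ", " ++ name_abrv_alt a ++ goAuthors rest := rfl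

-- the two name abbreviators agree
lemma name_abrv_eq (name : String) : name_abrv name = name_abrv_alt name := by
  unfold name_abrv name_abrv_alt
  simp only []
  set ws := pvSplit name " " with hws
  have hne : ws ≠ [] := pvSplit_ne_nil name " " (by decide)
  have h0 := abrv_fold_eq_sfx ws ws.length 0 "" rfl
  push_cast at h0
  rw [h0]
  simp only [List.drop_zero]
  rw [sfxAbrv_eq ws hne]
  rw [show ("" : String) ++ (" " ++ abrvGo ws) = " " ++ abrvGo ws by simp]
  exact slice_one_space _

-- A's unified author-loop step over a suffix computes temp ++ goAuthors of that suffix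
lemma auth_fold_eq_go (res : List String) :
    ∀ (k j : Nat) (temp : String), 1 ≤ j → res.length - j = k →
      (PySem.List.pyRange (j : Int) (res.length : Int) 1).foldl
        (fun temp i =>
          if i = (res.length : Int) - 1 then
            if 0 ≤ PySem.Str.find (PySem.List.pyGetD res i "") "others" then
              temp ++ " " ++ "et al."
            else
              temp ++ " and " ++ name_abrv (PySem.List.pyGetD res i "")
          else
            if 0 ≤ PySem.Str.find (PySem.List.pyGetD res i "") "others" then
              temp ++ " " ++ "et al."
            else
              temp ++ ", " ++ name_abrv (PySem.List.pyGetD res i "")) temp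
      = temp ++ goAuthors (res.drop j) := by
  intro k
  induction k with
  | zero =>
    intro j temp hj hk
    have hle : res.length ≤ j := by omega
    rw [PySem.List.pyRange_one_eq_nil (by exact_mod_cast hle),
      List.drop_eq_nil_of_le hle]
    simp [goAuthors]
  | succ k ih =>
    intro j temp hj hk
    have hlt : j < res.length := by omega
    rw [PySem.List.pyRange_one_cons (by exact_mod_cast hlt)]
    rw [List.foldl_cons]
    have hcast : ((j : Int) + 1) = ((j + 1 : Nat) : Int) := by push_cast; ring
    rw [hcast, ih (j+1) _ (by omega) (by omega)]
    rw [List.drop_eq_getElem_cons hlt]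
    have hget : PySem.List.pyGetD res (j : Int) "" = res[j] := by
      simp [PySem.List.pyGetD_natCast, List.getD_eq_getElem?_getD, List.getElem?_eq_getElem hlt]
    have hfi : (0 ≤ PySem.Str.find (PySem.List.pyGetD res (j : Int) "") "others") ↔
        (PySem.Str.isIn "others" (PySem.List.pyGetD res (j : Int) "") = true) := by
      rw [PySem.Str.find_nonneg_iff, PySem.Str.isIn_iff_infix]
    rw [hget] at hfi
    rw [hget, goAuthors_cons]
    by_cases hoth : PySem.Str.isIn "others" res[j] = true
    · rw [if_pos hoth]
      split_ifs with h1 h2 h3 <;>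
        first
          | exact absurd (hfi.mpr hoth) (by assumption)
          | simp [String.append_assoc]
    · have hfind : ¬ 0 ≤ PySem.Str.find res[j] "others" := fun hc => hoth (hfi.mp hc)
      rw [if_neg hoth]
      by_cases hlast : j + 1 < res.length
      · have hc : ¬ ((j : Int) = (res.length : Int) - 1) := by omega
        have hrest : res.drop (j+1) ≠ [] := by simp [List.drop_eq_nil_iff]; omega
        rw [if_neg hc, if_neg hfind, if_neg hrest, name_abrv_eq]
        simp [String.append_assoc]
      · have hc : ((j : Int) = (res.length : Int) - 1) := by omega
        have hrest : res.drop (j+1) = [] := List.drop_eq_nil_of_le (by omega)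
        rw [if_pos hc, if_neg hfind, hrest, if_pos rfl, name_abrv_eq]
        simp [goAuthors, String.append_assoc]

-- ===== VERDICT (by name: the statement is the Claim_ definition above) =====
theorem author_formatter_spec : Claim_equal_author_formatter := by
  intro author _
  unfold Spec_author_formatter author_formatter author_formatter_alt
  simp only []
  set res := pvSplit author " and " with hres
  have hne : res ≠ [] := pvSplit_ne_nil author " and " (by decide)
  have hlen : 1 ≤ res.length := List.length_pos_iff.mpr hne
  have hloop := fun temp0 =>
    auth_fold_eq_go res (res.length - 1) 1 temp0 (le_refl 1) (by omega)
  by_cases h1 : res.length = 1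
  · rw [if_pos h1, List.drop_eq_nil_of_le (by omega), name_abrv_eq]
    simp [goAuthors]
  · rw [if_neg h1]
    by_cases h2 : res.length = 2
    · rw [if_pos h2]
      obtain ⟨a, b, hab⟩ := List.length_eq_two.mp h2
      rw [hab]
      rw [show PySem.List.pyGetD [a, b] (1 : Int) "" = b from rfl,
        show PySem.List.pyGetD [a, b] (0 : Int) "" = a from rfl,
        show List.drop 1 [a, b] = [b] from rfl, goAuthors_cons]
      have hfi : (0 ≤ PySem.Str.find b "others") ↔
          (PySem.Str.isIn "others" b = true) := by
        rw [PySem.Str.find_nonneg_iff, PySem.Str.isIn_iff_infix]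
      by_cases hoth : PySem.Str.isIn "others" b = true
      · rw [if_pos (hfi.mpr hoth), if_pos hoth, name_abrv_eq]
        simp [goAuthors, String.append_assoc]
      · rw [if_neg (fun hc => hoth (hfi.mp hc)), if_neg hoth, if_pos rfl,
          name_abrv_eq, name_abrv_eq]
        simp [String.append_assoc]
    · rw [if_neg h2, if_pos (Or.inl (by omega : 3 ≤ res.length))]
      have h := hloop (name_abrv (PySem.List.pyGetD res 0 ""))
      push_cast at h
      rw [h, name_abrv_eq]
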